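-- pv_equiv track=rewrite | github.com/pc5401/my_BOJ | 백준/Bronze/5617. 問題 1/問題 1.py | solve
-- ===== SOURCE A (Python) =====
-- def solve(triples):
--     total = right = acute = obtuse = 0
--     for a, b, c in triples:
--         x, y, z = sorted((a, b, c))
--         if x + y <= z:
--             break
--         total += 1
--         s = x*x + y*y
--         if s == z*z:
--             right += 1
--         elif s > z*z:
--             acute += 1
--         else:
--             obtuse += 1
--     return total, right, acute, obtuse
-- ===== SOURCE B (Python) =====
-- def solve(triples):
--     # Sort-free: z = max side, so validity is a+b+c > 2*max and the angle class is
--     # the sign of a*a+b*b+c*c - 2*max*max (since x*x+y*y-z*z = sumsq - 2*z*z).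
--     cut = 0
--     while cut < len(triples):
--         a, b, c = triples[cut]
--         if a + b + c <= 2 * max(a, b, c):
--             break
--         cut += 1
--     signs = [(d > 0) - (d < 0)
--              for d in (a*a + b*b + c*c - 2*max(a, b, c)**2 for a, b, c in triples[:cut])]
--     return cut, signs.count(0), signs.count(1), signs.count(-1)
-- ===== Notes on version B (the rewrite author's own statement) =====
-- stated objective: alternative
-- what changed: B never sorts a triple: it uses the identities x+y>z <=> a+b+c>2*max and sign(x*x+y*y-z*z) = sign(a*a+b*b+c*c-2*max*max) to find the cut index of the first invalid triple with a while loop, then classifies the valid prefix by a sign list counted with list.count, instead of A's single break-loop that sorts each triple and keeps four running counters.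
import Mathlib
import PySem

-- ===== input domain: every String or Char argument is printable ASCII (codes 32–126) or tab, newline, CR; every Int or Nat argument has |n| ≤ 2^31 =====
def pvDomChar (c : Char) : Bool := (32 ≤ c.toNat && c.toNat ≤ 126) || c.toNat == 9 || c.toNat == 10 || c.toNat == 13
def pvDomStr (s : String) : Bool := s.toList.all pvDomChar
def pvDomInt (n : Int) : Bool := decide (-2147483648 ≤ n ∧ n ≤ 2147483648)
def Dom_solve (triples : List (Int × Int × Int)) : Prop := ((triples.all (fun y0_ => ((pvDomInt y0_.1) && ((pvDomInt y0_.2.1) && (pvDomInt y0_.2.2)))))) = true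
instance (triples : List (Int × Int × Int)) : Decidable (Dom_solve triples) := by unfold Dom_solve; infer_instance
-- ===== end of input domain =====

-- B avoids sorting each triple: it tests validity as a+b+c > 2*max and classifies by the
-- sign of a*a+b*b+c*c - 2*max*max, counting a sign list over the valid prefix; same value as A.

-- ===== PORT A =====
-- x, y, z = sorted((a, b, c)) ; the catch-all branch is unreachable (sorted preserves length 3)
def sort3 (t : Int × Int × Int) : Int × Int × Int :=
  match PySem.List.sorted [t.1, t.2.1, t.2.2] (fun x => x) false with
  | [x, y, z] => (x, y, z)
  | _ => (0, 0, 0)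

-- the for-loop of A with its break, carrying the four counters
def solveGo : List (Int × Int × Int) → Int → Int → Int → Int → Int × Int × Int × Int
  | [], total, right, acute, obtuse => (total, right, acute, obtuse)
  | t :: rest, total, right, acute, obtuse =>
    let (x, y, z) := sort3 t
    if x + y ≤ z then (total, right, acute, obtuse)
    else
      let s := x * x + y * y
      if s = z * z then solveGo rest (total + 1) (right + 1) acute obtuse
      else if s > z * z then solveGo rest (total + 1) right (acute + 1) obtuse
      else solveGo rest (total + 1) right acute (obtuse + 1)

def solve (triples : List (Int × Int × Int)) : Int × Int × Int × Int :=
  solveGo triples 0 0 0 0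

-- ===== PORT B =====
-- the while loop advancing cut until the first invalid triple (a+b+c <= 2*max)
def cutB : List (Int × Int × Int) → Nat
  | [] => 0
  | (a, b, c) :: rest =>
    if a + b + c ≤ 2 * (max a (max b c)) then 0 else cutB rest + 1

-- (d > 0) - (d < 0)
def signB (d : Int) : Int := (if d > 0 then 1 else 0) - (if d < 0 then 1 else 0)

-- the sign computed for one triple of the sliced prefix
def sigT (t : Int × Int × Int) : Int :=
  signB (t.1 * t.1 + t.2.1 * t.2.1 + t.2.2 * t.2.2 - 2 * (max t.1 (max t.2.1 t.2.2)) ^ 2)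

def solve_alt (triples : List (Int × Int × Int)) : Int × Int × Int × Int :=
  let signs := (triples.take (cutB triples)).map sigT
  ((cutB triples : Int), (signs.count 0 : Int), (signs.count 1 : Int), (signs.count (-1) : Int))

-- ===== PRECONDITION & SPEC =====
def Spec_solve (triples : List (Int × Int × Int)) (out : Int × Int × Int × Int) : Prop := out = solve_alt triples
instance (triples : List (Int × Int × Int)) (out : Int × Int × Int × Int) : Decidable (Spec_solve triples out) := by unfold Spec_solve; infer_instance

-- ===== CLAIM =====
def Claim_equal_solve : Prop := ∀ (triples : List (Int × Int × Int)), Dom_solve triples → Spec_solve triples (solve triples)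

-- ===== LEMMAS AND PROOFS =====
lemma sort3_eq (a b c x y z : Int) (hperm : [x, y, z].Perm [a, b, c])
    (h1 : x ≤ y) (h2 : y ≤ z) : sort3 (a, b, c) = (x, y, z) := by
  have hs := PySem.List.sorted_id_eq_of_perm_of_pairwise [a, b, c] [x, y, z] hperm
    (by simp; omega)
  simp [sort3, hs]

-- sorted((a,b,c)) has top element max(a,b,c) and preserves the sum and the sum of squares
lemma sort3_props (a b c : Int) :
    (sort3 (a, b, c)).2.2 = max a (max b c) ∧
    (sort3 (a, b, c)).1 + (sort3 (a, b, c)).2.1 + (sort3 (a, b, c)).2.2 = a + b + c ∧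
    (sort3 (a, b, c)).1 * (sort3 (a, b, c)).1 + (sort3 (a, b, c)).2.1 * (sort3 (a, b, c)).2.1
      + (sort3 (a, b, c)).2.2 * (sort3 (a, b, c)).2.2 = a * a + b * b + c * c := by
  by_cases hab : a ≤ b
  · by_cases hbc : b ≤ c
    · rw [sort3_eq a b c a b c (List.Perm.refl _) hab hbc]
      refine ⟨by simp; omega, by ring, by ring⟩
    · by_cases hac : a ≤ c
      · rw [sort3_eq a b c a c b (List.Perm.cons a (List.Perm.swap b c [])) hac (by omega)]
        refine ⟨by simp; omega, by ring, by ring⟩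
      · rw [sort3_eq a b c c a b
          ((List.Perm.swap a c [b]).trans (List.Perm.cons a (List.Perm.swap b c [])))
          (by omega) hab]
        refine ⟨by simp; omega, by ring, by ring⟩
  · by_cases hac : a ≤ c
    · rw [sort3_eq a b c b a c (List.Perm.swap a b [c]) (by omega) hac]
      refine ⟨by simp; omega, by ring, by ring⟩
    · by_cases hbc : b ≤ c
      · rw [sort3_eq a b c b c a
          ((List.Perm.cons b (List.Perm.swap a c [])).trans (List.Perm.swap a b [c]))
          hbc (by omega)]
        refine ⟨by simp; omega, by ring, by ring⟩
      · rw [sort3_eq a b c c b a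
          ((List.Perm.swap b c [a]).trans
            ((List.Perm.cons b (List.Perm.swap a c [])).trans (List.Perm.swap a b [c])))
          (by omega) (by omega)]
        refine ⟨by simp; omega, by ring, by ring⟩

lemma signB_of_pos {d : Int} (h : 0 < d) : signB d = 1 := by
  simp [signB, h, not_lt_of_gt h]

lemma signB_of_neg {d : Int} (h : d < 0) : signB d = -1 := by
  simp [signB, h, not_lt_of_gt h]

lemma signB_of_zero {d : Int} (h : d = 0) : signB d = 0 := by
  simp [signB, h]

-- the four components of solve_alt, unfolded
lemma alt_comp (l : List (Int × Int × Int)) :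
    solve_alt l = (((cutB l : Nat) : Int),
      (((l.take (cutB l)).map sigT).count 0 : Int),
      (((l.take (cutB l)).map sigT).count 1 : Int),
      (((l.take (cutB l)).map sigT).count (-1) : Int)) := rfl

lemma go_eq (l : List (Int × Int × Int)) : ∀ (tt r ac ob : Int),
    solveGo l tt r ac ob =
      (tt + (solve_alt l).1, r + (solve_alt l).2.1,
       ac + (solve_alt l).2.2.1, ob + (solve_alt l).2.2.2) := by
  induction l with
  | nil => intro tt r ac ob; simp [solveGo, solve_alt, cutB]
  | cons t rest ih =>
    intro tt r ac ob
    rcases t with ⟨a, b, c⟩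
    rcases hx : sort3 (a, b, c) with ⟨x, y, z⟩
    obtain ⟨hm, hsum, hsq⟩ := sort3_props a b c
    rw [hx] at hm hsum hsq
    simp only at hm hsum hsq
    by_cases hval : a + b + c ≤ 2 * (max a (max b c))
    · -- invalid triple: both sides stop immediately
      have hstop : x + y ≤ z := by omega
      have hcut : cutB ((a, b, c) :: rest) = 0 := by simp [cutB, hval]
      simp only [solveGo, hx]
      rw [if_pos hstop]
      simp [alt_comp, hcut]
    · -- valid triple: both sides advance by one classified triangle
      have hgo : ¬ (x + y ≤ z) := by omega
      have hcut : cutB ((a, b, c) :: rest) = cutB rest + 1 := by simp [cutB, hval]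
      have hsig : sigT (a, b, c) = signB (x * x + y * y - z * z) := by
        have hd : x * x + y * y - z * z
            = a * a + b * b + c * c - 2 * (max a (max b c)) ^ 2 := by
          rw [← hm]; linear_combination hsq
        simp only [sigT]; rw [hd]
      simp only [solveGo, hx]
      rw [if_neg hgo]
      have expand : ∀ k : Int,
          (((((a, b, c) :: rest).take (cutB ((a, b, c) :: rest))).map sigT).count k : Int)
            = (((rest.take (cutB rest)).map sigT).count k : Int)
              + (if sigT (a, b, c) = k then 1 else 0) := by
        intro k
        rw [hcut]
        simp only [List.take_succ_cons, List.map_cons, List.count_cons, beq_iff_eq]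
        push_cast
        split_ifs <;> omega
      by_cases h1 : x * x + y * y = z * z
      · rw [if_pos h1, ih, alt_comp ((a,b,c) :: rest), alt_comp rest]
        have hs : sigT (a, b, c) = 0 := by rw [hsig, signB_of_zero (by omega)]
        simp only [Prod.mk.injEq]
        refine ⟨by rw [hcut]; push_cast; ring, ?_, ?_, ?_⟩ <;>
          · rw [expand]; simp [hs]; try omega
      · by_cases h2 : x * x + y * y > z * z
        · rw [if_neg h1, if_pos h2, ih, alt_comp ((a,b,c) :: rest), alt_comp rest]
          have hs : sigT (a, b, c) = 1 := by rw [hsig, signB_of_pos (by omega)]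
          simp only [Prod.mk.injEq]
          refine ⟨by rw [hcut]; push_cast; ring, ?_, ?_, ?_⟩ <;>
            · rw [expand]; simp [hs]; try omega
        · rw [if_neg h1, if_neg h2, ih, alt_comp ((a,b,c) :: rest), alt_comp rest]
          have hs : sigT (a, b, c) = -1 := by rw [hsig, signB_of_neg (by omega)]
          simp only [Prod.mk.injEq]
          refine ⟨by rw [hcut]; push_cast; ring, ?_, ?_, ?_⟩ <;>
            · rw [expand]; simp [hs]; try omega

-- ===== VERDICT =====
theorem solve_spec : Claim_equal_solve := by
  intro triples _
  unfold Spec_solve solve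
  rw [go_eq]
  simp
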